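-- pv_equiv track=rewrite | github.com/Ulia-Demidova/MADE-Algorithms-hw | hw2/D.py | substring_count
-- ===== SOURCE A (Python) =====
-- COUNT = 26
--
-- CHAR_SHIFT = 97
--
-- def count(s, l, r):
--     cnt = [0] * COUNT
--     for i in range(l, r):
--         cnt[ord(s[i]) - CHAR_SHIFT] += 1
--     return cnt
--
-- def check(s, t):
--     for i in range(len(s)):
--         if s[i] > t[i]:
--             return False
--     return True
--
-- def idx(c):
--     return ord(c) - CHAR_SHIFT
--
-- def substring_count(s, t):
--     answer = 0
--     t_cnt = count(t, 0, len(t))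
--     left = 0
--     window = min(len(t), len(s))
--     right = window
--     sub_s_cnt = count(s, left, right)
--     while left < len(s):
--         if not check(sub_s_cnt, t_cnt):
--             sub_s_cnt[idx(s[right - 1])] -= 1
--             right -= 1
--             continue
--         else:
--             answer += right - left
--         sub_s_cnt[idx(s[left])] -= 1
--         left += 1
--         while right - left != window and right < len(s):
--             right += 1
--             sub_s_cnt[idx(s[right - 1])] += 1
--     return answer
-- ===== SOURCE B (Python) =====
-- def substring_count(s, t):
--     limit = [0] * 26
--     for c in t:
--         limit[ord(c) - 97] += 1
--     cnt = [0] * 26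
--     answer = 0
--     left = 0
--     over = 0  # number of letter buckets whose count currently exceeds its limit
--     for right in range(len(s)):
--         i = ord(s[right]) - 97
--         cnt[i] += 1
--         if cnt[i] == limit[i] + 1:
--             over += 1
--     # shrink from the left until the window is valid again
--         while over:
--             j = ord(s[left]) - 97
--             if cnt[j] == limit[j] + 1:
--                 over -= 1
--             cnt[j] -= 1
--             left += 1
--         answer += right - left + 1
--     return answer
-- ===== Notes on version B (the rewrite author's own statement) =====
-- stated objective: faster
-- what changed: A regrows the window to full size after every left step and then shrinks it back one character at a time, re-checking the whole 26-entry count array at each step; B is the standard monotone two-pointer whose right end never moves backwards, with an incremental violation counter, so each character is added and removed at most once with O(1) work per step.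
import Mathlib
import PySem

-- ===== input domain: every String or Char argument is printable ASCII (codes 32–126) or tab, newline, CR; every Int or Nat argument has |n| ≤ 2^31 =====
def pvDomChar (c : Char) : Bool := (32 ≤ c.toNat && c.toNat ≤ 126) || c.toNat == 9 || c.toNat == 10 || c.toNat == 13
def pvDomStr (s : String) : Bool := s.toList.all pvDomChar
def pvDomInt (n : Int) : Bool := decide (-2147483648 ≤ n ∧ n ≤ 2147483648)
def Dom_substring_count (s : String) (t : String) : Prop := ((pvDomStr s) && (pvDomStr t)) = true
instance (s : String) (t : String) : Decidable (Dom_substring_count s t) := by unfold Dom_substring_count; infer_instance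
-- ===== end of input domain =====

-- B replaces A's shrink-and-recheck sliding window (a full 26-entry comparison per step) by the
-- standard monotone two-pointer with an incremental violation counter; same results everywhere.

-- ===== PORT A =====

-- idx(c) = ord(c) - CHAR_SHIFT
def pvIdxA (c : Char) : Int := (c.toNat : Int) - 97

-- cnt[i] += d, shared by both ports (Python list indexing: negative i counts from the end;
-- the total pySetD/pyGetD are exact under Pre_, which keeps every index in range)
def pvBump (cnt : List Int) (i : Int) (d : Int) : List Int :=
  PySem.List.pySetD cnt i (PySem.List.pyGetD cnt i 0 + d)

-- count(s, l, r)
def pvCountA (s : List Char) (l r : Int) : List Int :=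
  (PySem.List.pyRange l r 1).foldl
    (fun cnt i => pvBump cnt (pvIdxA (PySem.List.pyGetD s i ' ')) 1)
    (List.replicate 26 0)

-- check(s, t)  (early return False ≡ List.all)
def pvCheckA (a b : List Int) : Bool :=
  (PySem.List.pyRange 0 (PySem.List.len a) 1).all
    (fun i => !(decide (PySem.List.pyGetD a i 0 > PySem.List.pyGetD b i 0)))

-- inner 'while right - left != window and right < len(s)' loop
def pvGrowA (s : List Char) (n window left : Int) (right : Int) (cnt : List Int) :
    Int × List Int :=
  if h : right - left ≠ window ∧ right < n then
    pvGrowA s n window left (right + 1)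
      (pvBump cnt (pvIdxA (PySem.List.pyGetD s (right + 1 - 1) ' ')) 1)
  else (right, cnt)
termination_by (n - right).toNat
decreasing_by omega

-- outer 'while left < len(s)' loop; fuel is an upper bound on the iteration count (each
-- iteration either decrements right or increments left), proved sufficient below
def pvLoopA (s : List Char) (n window : Int) (tcnt : List Int) :
    Nat → Int → Int → List Int → Int → Int
  | 0, _, _, _, ans => ans
  | fuel + 1, left, right, cnt, ans =>
    if left < n then
      if ¬ pvCheckA cnt tcnt then
        pvLoopA s n window tcnt fuel left (right - 1)
          (pvBump cnt (pvIdxA (PySem.List.pyGetD s (right - 1) ' ')) (-1)) ans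
      else
        let ans' := ans + (right - left)
        let cnt' := pvBump cnt (pvIdxA (PySem.List.pyGetD s left ' ')) (-1)
        let left' := left + 1
        let rc := pvGrowA s n window left' right cnt'
        pvLoopA s n window tcnt fuel left' rc.1 rc.2 ans'
    else ans

def substring_count (s : String) (t : String) : Int :=
  let sl := s.toList
  let tl := t.toList
  let n := PySem.List.len sl
  let tcnt := pvCountA tl 0 (PySem.List.len tl)
  let window := min (PySem.List.len tl) n
  pvLoopA sl n window tcnt ((sl.length + 1) * (sl.length + 3)) 0 window
    (pvCountA sl 0 window) 0

-- ===== PORT B =====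

-- 'while ov:' shrink loop; fuel len(s)+1 bounds its trip count (left ≤ right+1 ≤ len(s))
def pvShrinkB (s : List Char) (limit : List Int) :
    Nat → Int → Int → List Int → Int × Int × List Int
  | 0, ov, left, cnt => (ov, left, cnt)
  | fuel + 1, ov, left, cnt =>
    if ov ≠ 0 then
      let j := ((PySem.List.pyGetD s left ' ').toNat : Int) - 97
      let ov' :=
        if PySem.List.pyGetD cnt j 0 == PySem.List.pyGetD limit j 0 + 1 then ov - 1 else ov
      pvShrinkB s limit fuel ov' (left + 1) (pvBump cnt j (-1))
    else (ov, left, cnt)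

def substring_count_alt (s : String) (t : String) : Int :=
  let sl := s.toList
  let limit := t.toList.foldl
    (fun lim c => pvBump lim ((c.toNat : Int) - 97) 1) (List.replicate 26 0)
  let fin := (PySem.List.pyRange 0 (PySem.List.len sl) 1).foldl
    (fun (st : Int × List Int × Int × Int) right =>
      match st with
      | (left, cnt, ov, ans) =>
        let i := ((PySem.List.pyGetD sl right ' ').toNat : Int) - 97
        let cnt' := pvBump cnt i 1
        let ov' :=
          if PySem.List.pyGetD cnt' i 0 == PySem.List.pyGetD limit i 0 + 1 then ov + 1 else ov
        let olc := pvShrinkB sl limit (sl.length + 1) ov' left cnt'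
        (olc.2.1, olc.2.2, olc.1, ans + (right - olc.2.1 + 1)))
    (0, List.replicate 26 0, 0, 0)
  fin.2.2.2

-- ===== PRECONDITION & SPEC =====

-- Pre_ admits exactly the inputs on which the Python A returns: every character code in [71,122]
-- ('G'..'z'; Python's cnt[ord(c)-97] on a 26-list raises IndexError outside that range, and B's
-- identical indexing raises there too).
def Pre_substring_count (s : String) (t : String) : Prop :=
  (s.toList.all (fun c => 71 ≤ c.toNat && c.toNat ≤ 122)
    && t.toList.all (fun c => 71 ≤ c.toNat && c.toNat ≤ 122)) = true
instance (s : String) (t : String) : Decidable (Pre_substring_count s t) := by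
  unfold Pre_substring_count; infer_instance

def pvWitness_substring_count : String × String := ("abcab", "ab")

def Spec_substring_count (s : String) (t : String) (out : Int) : Prop :=
  out = substring_count_alt s t
instance (s : String) (t : String) (out : Int) : Decidable (Spec_substring_count s t out) := by
  unfold Spec_substring_count; infer_instance

-- ===== CLAIM (what is proved, stated in full; the proofs are below) =====
def Claim_equal_substring_count : Prop :=
  ∀ (s : String) (t : String), Dom_substring_count s t → Pre_substring_count s t →
    Spec_substring_count s t (substring_count s t)

-- ===== LEMMAS AND PROOFS =====

-- ---- bucket-string abstraction ----

-- the bucket Python's cnt[ord c - 97] actually hits on a 26-list, for codes in [71,122]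
def pvBkt (c : Char) : Nat := (c.toNat - 71) % 26

def pvInR (c : Char) : Prop := 71 ≤ c.toNat ∧ c.toNat ≤ 122

-- the window s[l:r] as a list of buckets
def pvSeg (u : List Nat) (l r : Nat) : List Nat := (u.drop l).take (r - l)

-- "window fits under t's counts"
def pvOk (u v : List Nat) (l r : Nat) : Bool :=
  (List.range 26).all (fun b => decide ((pvSeg u l r).count b ≤ v.count b))

-- value of the count array as a function of buckets
def pvCntF (u : List Nat) (l r : Nat) : Nat → Int := fun b => ((pvSeg u l r).count b : Int)

-- count-array representation predicate
def pvRep (cnt : List Int) (f : Nat → Int) : Prop :=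
  cnt.length = 26 ∧ ∀ b, b < 26 → cnt.getD b 0 = f b

-- largest r ∈ [l, |u|] whose window [l,r) fits
def pvMaxr (u v : List Nat) (l : Nat) : Nat :=
  l + Nat.findGreatest (fun m => pvOk u v l (l + m) = true) (u.length - l)

-- smallest l ∈ [0, r] whose window [l,r) fits
def pvMinl (u v : List Nat) (r : Nat) : Nat :=
  r - Nat.findGreatest (fun m => pvOk u v (r - m) r = true) r

lemma pvBkt_lt (c : Char) : pvBkt c < 26 := Nat.mod_lt _ (by norm_num)

lemma pvSeg_self (u : List Nat) (l : Nat) : pvSeg u l l = [] := by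
  simp [pvSeg]

lemma pvSeg_snoc (u : List Nat) (l r : Nat) (h1 : l ≤ r) (h2 : r < u.length) :
    pvSeg u l (r + 1) = pvSeg u l r ++ [u[r]] := by
  unfold pvSeg
  have h3 : r + 1 - l = (r - l) + 1 := by omega
  rw [h3, List.take_add_one]
  have h4 : (u.drop l)[r - l]? = some u[r] := by
    rw [List.getElem?_drop]
    have h5 : l + (r - l) = r := by omega
    rw [h5]
    exact List.getElem?_eq_getElem h2
  rw [h4]
  rfl

lemma pvSeg_cons (u : List Nat) (l r : Nat) (h1 : l < r) (h2 : l < u.length) :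
    pvSeg u l r = u[l] :: pvSeg u (l + 1) r := by
  unfold pvSeg
  rw [List.drop_eq_getElem_cons h2]
  have h3 : r - l = (r - (l + 1)) + 1 := by omega
  rw [h3, List.take_succ_cons]

lemma pvSeg_sublist (u : List Nat) (l l' r' r : Nat) (hl : l ≤ l') (hr : r' ≤ r) :
    (pvSeg u l' r').Sublist (pvSeg u l r) := by
  by_cases h : r' ≤ l'
  · have h0 : r' - l' = 0 := by omega
    have : pvSeg u l' r' = [] := by unfold pvSeg; simp [h0]
    simp [this]
  · have e2 : pvSeg u l' r = (pvSeg u l r).drop (l' - l) := by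
      unfold pvSeg
      rw [List.drop_take, List.drop_drop]
      have ha : l + (l' - l) = l' := by omega
      have hb : r - l - (l' - l) = r - l' := by omega
      rw [ha, hb]
    have e1 : pvSeg u l' r' = (pvSeg u l' r).take (r' - l') := by
      unfold pvSeg
      rw [List.take_take]
      have hc : min (r' - l') (r - l') = r' - l' := by omega
      rw [hc]
    rw [e1, e2]
    exact (List.take_sublist _ _).trans (List.drop_sublist _ _)

lemma pvOk_iff (u v : List Nat) (l r : Nat) :
    pvOk u v l r = true ↔ ∀ b, b < 26 → (pvSeg u l r).count b ≤ v.count b := by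
  simp [pvOk, List.all_eq_true, List.mem_range]

lemma pvOk_mono (u v : List Nat) (l l' r' r : Nat) (h : pvOk u v l r = true)
    (hl : l ≤ l') (hr : r' ≤ r) : pvOk u v l' r' = true := by
  rw [pvOk_iff] at h ⊢
  exact fun b hb => le_trans (List.Sublist.count_le b (pvSeg_sublist u l l' r' r hl hr)) (h b hb)

lemma pvOk_self (u v : List Nat) (l : Nat) : pvOk u v l l = true := by
  rw [pvOk_iff]; simp [pvSeg_self]

lemma pvSum_count (w : List Nat) (hw : ∀ x ∈ w, x < 26) :
    ∑ b ∈ Finset.range 26, w.count b = w.length := by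
  induction w with
  | nil => simp
  | cons x ws ih =>
    have hx : x < 26 := hw x List.mem_cons_self
    have ih' := ih (fun y hy => hw y (List.mem_cons_of_mem _ hy))
    simp only [List.count_cons, List.length_cons]
    have hone : ∑ b ∈ Finset.range 26, (if x == b then 1 else 0) = 1 := by
      simp only [beq_iff_eq]
      rw [Finset.sum_ite_eq (Finset.range 26) x (fun _ => 1)]
      simp [hx]
    rw [Finset.sum_add_distrib, ih', hone]

lemma pvOk_len (u v : List Nat) (l r : Nat) (hu : ∀ x ∈ u, x < 26) (hv : ∀ x ∈ v, x < 26)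
    (h : pvOk u v l r = true) : (pvSeg u l r).length ≤ v.length := by
  rw [pvOk_iff] at h
  have hseg : ∀ x ∈ pvSeg u l r, x < 26 := fun x hx =>
    hu x (List.mem_of_mem_drop (List.mem_of_mem_take hx))
  calc (pvSeg u l r).length = ∑ b ∈ Finset.range 26, (pvSeg u l r).count b :=
        (pvSum_count _ hseg).symm
    _ ≤ ∑ b ∈ Finset.range 26, v.count b :=
        Finset.sum_le_sum (fun b hb => h b (Finset.mem_range.mp hb))
    _ = v.length := pvSum_count _ hv

lemma pvMaxr_ge (u v : List Nat) (l : Nat) : l ≤ pvMaxr u v l := Nat.le_add_right _ _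

lemma pvMaxr_le (u v : List Nat) (l : Nat) (hl : l ≤ u.length) : pvMaxr u v l ≤ u.length := by
  have := Nat.findGreatest_le (P := fun m => pvOk u v l (l + m) = true) (u.length - l)
  unfold pvMaxr; omega

lemma pvOk_maxr (u v : List Nat) (l : Nat) : pvOk u v l (pvMaxr u v l) = true := by
  unfold pvMaxr
  exact Nat.findGreatest_spec (P := fun m => pvOk u v l (l + m) = true) (Nat.zero_le _)
    (by simpa using pvOk_self u v l)

lemma pvOk_iff_le_maxr (u v : List Nat) (l r : Nat) (hl : l ≤ r) (hr : r ≤ u.length) :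
    (pvOk u v l r = true ↔ r ≤ pvMaxr u v l) := by
  constructor
  · intro h
    have hle : r - l ≤ u.length - l := by omega
    have hP : pvOk u v l (l + (r - l)) = true := by
      have : l + (r - l) = r := by omega
      rw [this]; exact h
    have := Nat.le_findGreatest (P := fun m => pvOk u v l (l + m) = true) hle hP
    unfold pvMaxr; omega
  · intro h
    exact pvOk_mono u v l l r (pvMaxr u v l) (pvOk_maxr u v l) le_rfl h

lemma pvMaxr_le_add (u v : List Nat) (l : Nat) (hl : l ≤ u.length)
    (hu : ∀ x ∈ u, x < 26) (hv : ∀ x ∈ v, x < 26) : pvMaxr u v l ≤ l + v.length := by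
  have hok := pvOk_maxr u v l
  have hlen := pvOk_len u v l (pvMaxr u v l) hu hv hok
  have hm := pvMaxr_le u v l hl
  have hg := pvMaxr_ge u v l
  have : (pvSeg u l (pvMaxr u v l)).length = pvMaxr u v l - l := by
    unfold pvSeg
    rw [List.length_take, List.length_drop]
    omega
  omega

lemma pvMinl_le (u v : List Nat) (r : Nat) : pvMinl u v r ≤ r := Nat.sub_le _ _

lemma pvOk_minl (u v : List Nat) (r : Nat) : pvOk u v (pvMinl u v r) r = true := by
  unfold pvMinl
  exact Nat.findGreatest_spec (P := fun m => pvOk u v (r - m) r = true) (Nat.zero_le _)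
    (by simpa using pvOk_self u v r)

lemma pvOk_iff_minl_le (u v : List Nat) (l r : Nat) (hl : l ≤ r) :
    (pvOk u v l r = true ↔ pvMinl u v r ≤ l) := by
  constructor
  · intro h
    have hP : pvOk u v (r - (r - l)) r = true := by
      have : r - (r - l) = l := by omega
      rw [this]; exact h
    have := Nat.le_findGreatest (P := fun m => pvOk u v (r - m) r = true) (Nat.sub_le r l) hP
    have hle := Nat.findGreatest_le (P := fun m => pvOk u v (r - m) r = true) r
    unfold pvMinl; omega
  · intro h
    exact pvOk_mono u v (pvMinl u v r) l r r (pvOk_minl u v r) h le_rfl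

lemma pvMinl_mono (u v : List Nat) (r r' : Nat) (h : r ≤ r') : pvMinl u v r ≤ pvMinl u v r' := by
  by_cases hc : pvMinl u v r' ≤ r
  · have hok : pvOk u v (pvMinl u v r') r = true :=
      pvOk_mono u v (pvMinl u v r') (pvMinl u v r') r r' (pvOk_minl u v r') le_rfl h
    exact (pvOk_iff_minl_le u v (pvMinl u v r') r hc).mp hok
  · exact le_trans (pvMinl_le u v r) (by omega)

-- double counting: both programs count the pairs l < r with a fitting window [l,r)
lemma pvFubini (u v : List Nat) :
    ∑ l ∈ Finset.range u.length, (pvMaxr u v l - l)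
      = ∑ r ∈ Finset.range (u.length + 1), (r - pvMinl u v r) := by
  have hcard1 :
      ((Finset.range u.length ×ˢ Finset.range (u.length + 1)).filter
        (fun p => p.1 < p.2 ∧ p.2 ≤ pvMaxr u v p.1)).card
        = ∑ l ∈ Finset.range u.length, (pvMaxr u v l - l) := by
    rw [Finset.card_filter, Finset.sum_product]
    refine Finset.sum_congr rfl (fun l hl => ?_)
    have hln : l < u.length := Finset.mem_range.mp hl
    rw [← Finset.card_filter]
    have hmx := pvMaxr_le u v l hln.le
    have hge := pvMaxr_ge u v l
    have hEq : (Finset.range (u.length + 1)).filter (fun r => l < r ∧ r ≤ pvMaxr u v l)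
        = Finset.Ico (l + 1) (pvMaxr u v l + 1) := by
      ext r
      simp only [Finset.mem_filter, Finset.mem_range, Finset.mem_Ico]
      omega
    rw [hEq, Nat.card_Ico]
    omega
  have hcard2 :
      ((Finset.range u.length ×ˢ Finset.range (u.length + 1)).filter
        (fun p => p.1 < p.2 ∧ p.2 ≤ pvMaxr u v p.1)).card
        = ∑ r ∈ Finset.range (u.length + 1), (r - pvMinl u v r) := by
    have hEq0 :
        ((Finset.range u.length ×ˢ Finset.range (u.length + 1)).filter
          (fun p => p.1 < p.2 ∧ p.2 ≤ pvMaxr u v p.1))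
          = ((Finset.range u.length ×ˢ Finset.range (u.length + 1)).filter
          (fun p => p.1 < p.2 ∧ pvMinl u v p.2 ≤ p.1)) := by
      apply Finset.filter_congr
      intro p hp
      rcases Finset.mem_product.mp hp with ⟨hp1, hp2⟩
      have h1 : p.1 < u.length := Finset.mem_range.mp hp1
      have h2 : p.2 < u.length + 1 := Finset.mem_range.mp hp2
      by_cases h12 : p.1 < p.2
      · have hiff : (p.2 ≤ pvMaxr u v p.1 ↔ pvMinl u v p.2 ≤ p.1) :=
          ((pvOk_iff_le_maxr u v p.1 p.2 h12.le (by omega)).symm.trans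
            (pvOk_iff_minl_le u v p.1 p.2 h12.le))
        simp [h12, hiff]
      · simp [h12]
    rw [hEq0, Finset.card_filter, Finset.sum_product_right]
    refine Finset.sum_congr rfl (fun r hr => ?_)
    have hrn : r < u.length + 1 := Finset.mem_range.mp hr
    rw [← Finset.card_filter]
    have hml := pvMinl_le u v r
    have hEq : (Finset.range u.length).filter (fun l => l < r ∧ pvMinl u v r ≤ l)
        = Finset.Ico (pvMinl u v r) r := by
      ext l
      simp only [Finset.mem_filter, Finset.mem_range, Finset.mem_Ico]
      omega
    rw [hEq, Nat.card_Ico]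
  rw [← hcard1, hcard2]



-- ---- count-array bridge: Python's cnt[ord c - 97] on a 26-list hits bucket pvBkt c ----

lemma pvGetD_bkt (cnt : List Int) (h26 : cnt.length = 26) (c : Char) (hc : pvInR c) (d : Int) :
    PySem.List.pyGetD cnt ((c.toNat : Int) - 97) d = cnt.getD (pvBkt c) d := by
  obtain ⟨hc1, hc2⟩ := hc
  by_cases h : 97 ≤ c.toNat
  · have he : ((c.toNat : Int) - 97) = ((c.toNat - 97 : Nat) : Int) := by omega
    rw [he, PySem.List.pyGetD_natCast]
    have : pvBkt c = c.toNat - 97 := by unfold pvBkt; omega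
    rw [this]
  · have he : ((c.toNat : Int) - 97) = -(((97 - c.toNat : Nat) : Int)) := by omega
    have hk1 : 0 < 97 - c.toNat := by omega
    have hk2 : 97 - c.toNat ≤ cnt.length := by omega
    rw [he, PySem.List.pyGetD_neg_natCast cnt (97 - c.toNat) d hk1 hk2]
    have hidx : cnt.length - (97 - c.toNat) < cnt.length := by omega
    have : pvBkt c = cnt.length - (97 - c.toNat) := by unfold pvBkt; omega
    rw [this, List.getD_eq_getElem _ _ hidx]

lemma pvSetD_bkt (cnt : List Int) (h26 : cnt.length = 26) (c : Char) (hc : pvInR c) (x : Int) :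
    PySem.List.pySetD cnt ((c.toNat : Int) - 97) x = cnt.set (pvBkt c) x := by
  obtain ⟨hc1, hc2⟩ := hc
  by_cases h : 97 ≤ c.toNat
  · have he : ((c.toNat : Int) - 97) = ((c.toNat - 97 : Nat) : Int) := by omega
    rw [he, PySem.List.pySetD_natCast]
    have : pvBkt c = c.toNat - 97 := by unfold pvBkt; omega
    rw [this]
  · have he : ((c.toNat : Int) - 97) = -(((97 - c.toNat : Nat) : Int)) := by omega
    have hk0 : ¬ (0 ≤ -(((97 - c.toNat : Nat) : Int))) := by omega
    have hk1 : -(cnt.length : Int) ≤ -(((97 - c.toNat : Nat) : Int)) := by omega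
    have hk2 : (97 - c.toNat) ≠ 0 := by omega
    rw [he]
    have ht : (- -(((97 - c.toNat : Nat)) : Int)).toNat = 97 - c.toNat := by omega
    simp only [PySem.List.pySetD, PySem.List.pySet?, PySem.List.pyIdx?, hk0, if_false, hk1,
      if_true, Option.map_some, Option.getD_some, ht]
    have : pvBkt c = cnt.length - (97 - c.toNat) := by unfold pvBkt; omega
    rw [this]

lemma pvRep_congr (cnt : List Int) (f g : Nat → Int) (h : pvRep cnt f)
    (hfg : ∀ b, b < 26 → f b = g b) : pvRep cnt g :=
  ⟨h.1, fun b hb => (h.2 b hb).trans (hfg b hb)⟩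

lemma pvRep_zero : pvRep (List.replicate 26 (0 : Int)) (fun _ => 0) := by
  refine ⟨List.length_replicate, fun b hb => ?_⟩
  rw [List.getD_eq_getElem _ _ (by simpa using hb)]
  exact List.getElem_replicate _

lemma pvRep_bump (cnt : List Int) (f : Nat → Int) (h : pvRep cnt f) (c : Char) (hc : pvInR c)
    (d : Int) :
    pvRep (PySem.List.pySetD cnt ((c.toNat : Int) - 97)
        (PySem.List.pyGetD cnt ((c.toNat : Int) - 97) 0 + d))
      (Function.update f (pvBkt c) (f (pvBkt c) + d)) := by
  obtain ⟨h26, hf⟩ := h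
  have hv : cnt.getD (pvBkt c) 0 = f (pvBkt c) := hf _ (pvBkt_lt c)
  rw [pvSetD_bkt cnt h26 c hc, pvGetD_bkt cnt h26 c hc, hv]
  refine ⟨by simp [h26], fun b hb => ?_⟩
  have hb' : b < (cnt.set (pvBkt c) (f (pvBkt c) + d)).length := by
    simp only [List.length_set, h26]; omega
  rw [List.getD_eq_getElem _ _ hb', List.getElem_set]
  by_cases hbc : pvBkt c = b
  · subst hbc
    rw [if_pos rfl, Function.update_self]
  · rw [if_neg hbc, Function.update_of_ne (fun hh => hbc hh.symm)]
    exact (List.getD_eq_getElem cnt 0 (n := b) (by omega)).symm.trans (hf b hb)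

lemma pvRep_bumpA (cnt : List Int) (f : Nat → Int) (h : pvRep cnt f) (c : Char) (hc : pvInR c)
    (d : Int) :
    pvRep (pvBump cnt (pvIdxA c) d) (Function.update f (pvBkt c) (f (pvBkt c) + d)) := by
  unfold pvBump pvIdxA
  exact pvRep_bump cnt f h c hc d

lemma pvRep_bumpB (cnt : List Int) (f : Nat → Int) (h : pvRep cnt f) (c : Char) (hc : pvInR c)
    (d : Int) :
    pvRep (pvBump cnt ((c.toNat : Int) - 97) d)
      (Function.update f (pvBkt c) (f (pvBkt c) + d)) := by
  unfold pvBump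
  exact pvRep_bump cnt f h c hc d

lemma pvCheck_iff (cnt tc : List Int) (f g : Nat → Int) (hc : pvRep cnt f) (ht : pvRep tc g) :
    (pvCheckA cnt tc = true) ↔ ∀ b, b < 26 → f b ≤ g b := by
  obtain ⟨h26, hf⟩ := hc
  obtain ⟨h26t, hg⟩ := ht
  unfold pvCheckA
  have hlen : PySem.List.len cnt = (26 : Int) := by
    rw [PySem.List.len_eq, h26]; rfl
  rw [hlen, List.all_eq_true]
  constructor
  · intro h b hb
    have hmem : ((b : Nat) : Int) ∈ PySem.List.pyRange 0 26 1 := by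
      rw [PySem.List.mem_pyRange_one]; omega
    have := h _ hmem
    simp only [PySem.List.pyGetD_natCast, Bool.not_eq_eq_eq_not, Bool.not_true,
      decide_eq_false_iff_not, not_lt] at this
    rw [hf b hb, hg b hb] at this
    exact this
  · intro h i hi
    rw [PySem.List.mem_pyRange_one] at hi
    have hb : i = ((i.toNat : Nat) : Int) := by omega
    rw [hb]
    simp only [PySem.List.pyGetD_natCast, Bool.not_eq_eq_eq_not, Bool.not_true,
      decide_eq_false_iff_not, not_lt]
    rw [hf i.toNat (by omega), hg i.toNat (by omega)]
    exact h i.toNat (by omega)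

-- pvCountA computes bucket counts of the first m characters
lemma pvCount_rep (xs : List Char) (hx : ∀ c ∈ xs, pvInR c) :
    ∀ (m : Nat), m ≤ xs.length →
      pvRep (pvCountA xs 0 (m : Int)) (fun b => (((xs.take m).map pvBkt).count b : Int)) := by
  intro m
  induction m with
  | zero =>
    intro _
    unfold pvCountA
    rw [show ((0 : Nat) : Int) = (0 : Int) from rfl, PySem.List.pyRange_one_eq_nil le_rfl]
    exact pvRep_congr _ _ _ pvRep_zero (by simp)
  | succ m ih =>
    intro hm
    have hrep := ih (by omega)
    unfold pvCountA at hrep ⊢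
    have hsplit : PySem.List.pyRange 0 ((m + 1 : Nat) : Int) 1
        = PySem.List.pyRange 0 (m : Int) 1 ++ [(m : Int)] := by
      have he : ((m + 1 : Nat) : Int) = ((m : Nat) : Int) + 1 := by push_cast; ring
      rw [he, PySem.List.pyRange_one_succ_right (by positivity)]
    rw [hsplit, List.foldl_append, List.foldl_cons, List.foldl_nil]
    have hchar : PySem.List.pyGetD xs (m : Int) ' ' = xs[m] := by
      rw [PySem.List.pyGetD_natCast]
      exact List.getD_eq_getElem _ _ (by omega)
    rw [hchar]
    have hstep := pvRep_bumpA _ _ hrep xs[m] (hx _ (List.getElem_mem _)) 1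
    refine pvRep_congr _ _ _ hstep ?_
    intro b hb
    have htk : xs.take (m + 1) = xs.take m ++ [xs[m]] := by
      rw [List.take_add_one, List.getElem?_eq_getElem (by omega)]
      rfl
    rw [htk, List.map_append, List.count_append]
    simp only [List.map_cons, List.map_nil, List.count_singleton]
    by_cases hbc : b = pvBkt xs[m]
    · subst hbc
      rw [Function.update_self]
      simp only [beq_self_eq_true, if_pos]
      push_cast
      ring
    · rw [Function.update_of_ne hbc]
      have hne : (pvBkt xs[m] == b) = false := by simp [Ne.symm hbc]
      rw [hne]
      simp

-- B's limit fold computes t's bucket counts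
lemma pvLimit_fold (cs : List Char) :
    ∀ (acc : List Int) (f : Nat → Int), pvRep acc f → (∀ c ∈ cs, pvInR c) →
      pvRep (cs.foldl (fun lim c => pvBump lim ((c.toNat : Int) - 97) 1) acc)
        (fun b => f b + ((cs.map pvBkt).count b : Int)) := by
  induction cs with
  | nil =>
    intro acc f hrep _
    simp only [List.foldl_nil]
    exact pvRep_congr _ _ _ hrep (by simp)
  | cons c cs ih =>
    intro acc f hrep hc
    simp only [List.foldl_cons]
    have h1 := pvRep_bumpB acc f hrep c (hc c List.mem_cons_self) 1
    have h2 := ih _ _ h1 (fun y hy => hc y (List.mem_cons_of_mem _ hy))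
    refine pvRep_congr _ _ _ h2 ?_
    intro b hb
    simp only [List.map_cons, List.count_cons]
    by_cases hbc : b = pvBkt c
    · subst hbc
      rw [Function.update_self]
      simp only [beq_self_eq_true, if_pos]
      push_cast
      ring
    · rw [Function.update_of_ne hbc]
      have hne : (pvBkt c == b) = false := by simp [Ne.symm hbc]
      rw [hne]
      simp


-- ---- A-side loop invariants ----

lemma pvCntF_snoc (u : List Nat) (l r : Nat) (h1 : l ≤ r) (h2 : r < u.length) (b : Nat) :
    pvCntF u l (r + 1) b = if b = u[r] then pvCntF u l r b + 1 else pvCntF u l r b := by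
  unfold pvCntF
  rw [pvSeg_snoc u l r h1 h2, List.count_append, List.count_singleton]
  by_cases hb : b = u[r]
  · rw [if_pos hb]
    have he : (u[r] == b) = true := by simp [hb]
    rw [he]
    norm_num
  · rw [if_neg hb]
    have he : (u[r] == b) = false := by simp [Ne.symm hb]
    rw [he]
    simp

lemma pvCntF_cons (u : List Nat) (l r : Nat) (h1 : l < r) (h2 : l < u.length) (b : Nat) :
    pvCntF u l r b = if b = u[l] then pvCntF u (l + 1) r b + 1 else pvCntF u (l + 1) r b := by
  unfold pvCntF
  rw [pvSeg_cons u l r h1 h2, List.count_cons]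
  by_cases hb : b = u[l]
  · rw [if_pos hb]
    have he : (u[l] == b) = true := by simp [hb]
    rw [he]
    norm_num
  · rw [if_neg hb]
    have he : (u[l] == b) = false := by simp [Ne.symm hb]
    rw [he]
    simp

lemma pvCntF_empty (u : List Nat) (l b : Nat) : pvCntF u l l b = 0 := by
  unfold pvCntF
  rw [pvSeg_self]
  simp

lemma pvBkt_getElem (sl : List Char) (i : Nat) (h : i < sl.length) :
    (sl.map pvBkt)[i]'(by simpa using h) = pvBkt sl[i] := by
  simp

lemma pvBktMap_lt (xs : List Char) : ∀ x ∈ xs.map pvBkt, x < 26 := by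
  intro x hx
  rcases List.mem_map.mp hx with ⟨c, _, hc⟩
  rw [← hc]
  exact pvBkt_lt c

lemma pvChar_getD (sl : List Char) (i : Nat) (h : i < sl.length) :
    PySem.List.pyGetD sl (i : Int) ' ' = sl[i] := by
  rw [PySem.List.pyGetD_natCast]
  exact List.getD_eq_getElem _ _ h

lemma pvGrow_spec (sl : List Char) (hs : ∀ c ∈ sl, pvInR c) (w l : Nat) :
    ∀ (k r : Nat) (cnt : List Int),
      min (l + w) sl.length - r ≤ k →
      l ≤ r → r ≤ min (l + w) sl.length →
      pvRep cnt (pvCntF (sl.map pvBkt) l r) →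
      ∃ cnt', pvGrowA sl (sl.length : Int) (w : Int) (l : Int) (r : Int) cnt
          = (((min (l + w) sl.length : Nat) : Int), cnt')
        ∧ pvRep cnt' (pvCntF (sl.map pvBkt) l (min (l + w) sl.length)) := by
  intro k
  induction k with
  | zero =>
    intro r cnt hk h1 h2 hrep
    have hrM : r = min (l + w) sl.length := by omega
    subst hrM
    rw [pvGrowA, dif_neg (by omega)]
    exact ⟨cnt, rfl, hrep⟩
  | succ k ih =>
    intro r cnt hk h1 h2 hrep
    by_cases hrM : r = min (l + w) sl.length
    · subst hrM
      rw [pvGrowA, dif_neg (by omega)]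
      exact ⟨cnt, rfl, hrep⟩
    · have hrlt : r < min (l + w) sl.length := by omega
      rw [pvGrowA, dif_pos (by omega)]
      have hidx : ((r : Int) + 1 - 1) = ((r : Nat) : Int) := by ring
      have hrn : r < sl.length := by omega
      rw [hidx, pvChar_getD sl r hrn]
      have hstep := pvRep_bumpA _ _ hrep sl[r] (hs _ (List.getElem_mem _)) 1
      have hrep' : pvRep (pvBump cnt (pvIdxA sl[r]) 1) (pvCntF (sl.map pvBkt) l (r + 1)) := by
        refine pvRep_congr _ _ _ hstep ?_
        intro b hb
        rw [pvCntF_snoc (sl.map pvBkt) l r h1 (by simpa using hrn), pvBkt_getElem sl r hrn]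
        by_cases hbc : b = pvBkt sl[r]
        · subst hbc
          rw [Function.update_self, if_pos rfl]
        · rw [Function.update_of_ne hbc, if_neg hbc]
      have hcast : ((r : Int) + 1) = (((r + 1 : Nat)) : Int) := by push_cast; ring
      rw [hcast]
      exact ih (r + 1) _ (by omega) (by omega) (by omega) hrep'

lemma pvMaxr_le_min (u v : List Nat) (l w : Nat) (hl : l ≤ u.length)
    (hw : min v.length u.length ≤ w) (hu : ∀ x ∈ u, x < 26) (hv : ∀ x ∈ v, x < 26) :
    pvMaxr u v l ≤ min (l + w) u.length := by
  have h1 := pvMaxr_le_add u v l hl hu hv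
  have h2 := pvMaxr_le u v l hl
  omega

lemma pvLoopA_spec (sl tl : List Char) (hs : ∀ c ∈ sl, pvInR c)
    (tcnt : List Int) (htc : pvRep tcnt (fun b => (((tl.map pvBkt).count b : Nat) : Int))) :
    ∀ (fuel : Nat) (l r : Nat) (cnt : List Int) (ans : Int),
      l ≤ sl.length →
      r ≤ min (l + min tl.length sl.length) sl.length →
      pvMaxr (sl.map pvBkt) (tl.map pvBkt) l ≤ r →
      pvRep cnt (pvCntF (sl.map pvBkt) l r) →
      (sl.length - l) * (sl.length + 2) + r + 1 ≤ fuel →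
      pvLoopA sl (sl.length : Int) ((min tl.length sl.length : Nat) : Int) tcnt fuel
          (l : Int) (r : Int) cnt ans
        = ans + ∑ x ∈ Finset.Ico l sl.length,
            (((pvMaxr (sl.map pvBkt) (tl.map pvBkt) x : Nat) : Int) - (x : Int)) := by
  intro fuel
  induction fuel with
  | zero => intro l r cnt ans _ _ _ _ hfuel; omega
  | succ fuel ih =>
    intro l r cnt ans hln hrm hmx hrep hfuel
    have hu := pvBktMap_lt sl
    have hv := pvBktMap_lt tl
    have hul : (sl.map pvBkt).length = sl.length := by simp
    have hvl : (tl.map pvBkt).length = tl.length := by simp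
    by_cases hlt : l < sl.length
    · have hrn : r ≤ sl.length := by omega
      have hlr : l ≤ r := le_trans (pvMaxr_ge _ _ _) hmx
      have hchk : (pvCheckA cnt tcnt = true)
          ↔ pvOk (sl.map pvBkt) (tl.map pvBkt) l r = true := by
        rw [pvCheck_iff cnt tcnt _ _ hrep htc, pvOk_iff]
        unfold pvCntF
        constructor
        · intro h b hb
          exact_mod_cast h b hb
        · intro h b hb
          exact_mod_cast h b hb
      simp only [pvLoopA]
      rw [if_pos (show ((l : Nat) : Int) < ((sl.length : Nat) : Int) by exact_mod_cast hlt)]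
      by_cases hok : pvOk (sl.map pvBkt) (tl.map pvBkt) l r = true
      · -- valid window: r = maxr l; count it, step left, regrow
        rw [if_neg (by rw [hchk]; simpa using hok)]
        have hrmax : r = pvMaxr (sl.map pvBkt) (tl.map pvBkt) l :=
          le_antisymm ((pvOk_iff_le_maxr _ _ l r hlr (by rw [hul]; omega)).mp hok) hmx
        rw [pvChar_getD sl l hlt]
        have hbump := pvRep_bumpA _ _ hrep sl[l] (hs _ (List.getElem_mem _)) (-1)
        have hgrow : ∃ cnt'',
            pvGrowA sl (sl.length : Int) ((min tl.length sl.length : Nat) : Int)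
                ((l : Int) + 1) (r : Int) (pvBump cnt (pvIdxA sl[l]) (-1))
              = (((min (l + 1 + min tl.length sl.length) sl.length : Nat) : Int), cnt'')
            ∧ pvRep cnt'' (pvCntF (sl.map pvBkt) (l + 1)
                (min (l + 1 + min tl.length sl.length) sl.length)) := by
          have hcastl : ((l : Int) + 1) = (((l + 1 : Nat)) : Int) := by push_cast; ring
          rcases Nat.eq_or_lt_of_le hlr with hrl | hrl
          · -- r = l : Python transiently has right = left - 1; one grow step restores it
            have hrepl := hbump
            rw [← hrl] at hrepl
            rw [← hrl]
            rw [pvGrowA, dif_pos (by omega)]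
            have hidx : ((l : Int) + 1 - 1) = ((l : Nat) : Int) := by ring
            rw [hidx, pvChar_getD sl l hlt]
            have hstep2 := pvRep_bumpA _ _ hrepl sl[l] (hs _ (List.getElem_mem _)) 1
            have hrep2 : pvRep (pvBump (pvBump cnt (pvIdxA sl[l]) (-1)) (pvIdxA sl[l]) 1)
                (pvCntF (sl.map pvBkt) (l + 1) (l + 1)) := by
              refine pvRep_congr _ _ _ hstep2 ?_
              intro b hb
              by_cases hbc : b = pvBkt sl[l]
              · rw [← hbc, Function.update_self, Function.update_self, pvCntF_empty,
                  pvCntF_empty]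
                ring
              · rw [Function.update_of_ne hbc, Function.update_of_ne hbc, pvCntF_empty,
                  pvCntF_empty]
            rw [hcastl]
            exact pvGrow_spec sl hs (min tl.length sl.length) (l + 1)
              (min (l + 1 + min tl.length sl.length) sl.length - (l + 1)) (l + 1) _ (by omega)
              le_rfl (by omega) hrep2
          · -- l < r : plain regrow from [l+1, r)
            have hrep1 : pvRep (pvBump cnt (pvIdxA sl[l]) (-1))
                (pvCntF (sl.map pvBkt) (l + 1) r) := by
              refine pvRep_congr _ _ _ hbump ?_
              intro b hb
              have hcons := pvCntF_cons (sl.map pvBkt) l r hrl (by simpa using hlt)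
              rw [pvBkt_getElem sl l hlt] at hcons
              by_cases hbc : b = pvBkt sl[l]
              · subst hbc
                rw [Function.update_self, hcons _, if_pos rfl]
                ring
              · rw [Function.update_of_ne hbc, hcons b, if_neg hbc]
            rw [hcastl]
            exact pvGrow_spec sl hs (min tl.length sl.length) (l + 1)
              (min (l + 1 + min tl.length sl.length) sl.length - r) r _ (by omega)
              (by omega) (by omega) hrep1
        obtain ⟨cnt'', hgeq, hrep''⟩ := hgrow
        rw [hgeq]
        have hcastl : ((l : Int) + 1) = (((l + 1 : Nat)) : Int) := by push_cast; ring
        rw [hcastl]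
        have hmx' : pvMaxr (sl.map pvBkt) (tl.map pvBkt) (l + 1)
            ≤ min (l + 1 + min tl.length sl.length) sl.length := by
          have := pvMaxr_le_min (sl.map pvBkt) (tl.map pvBkt) (l + 1)
            (min tl.length sl.length) (by omega) (by rw [hul, hvl]) hu hv
          rw [hul] at this
          omega
        have hfuel' : (sl.length - (l + 1)) * (sl.length + 2)
            + min (l + 1 + min tl.length sl.length) sl.length + 1 ≤ fuel := by
          have hexp : (sl.length - l) * (sl.length + 2)
              = (sl.length - (l + 1)) * (sl.length + 2) + (sl.length + 2) := by
            have hst : sl.length - l = (sl.length - (l + 1)) + 1 := by omega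
            rw [hst, Nat.add_mul, Nat.one_mul]
          generalize hK : (sl.length - (l + 1)) * (sl.length + 2) = K at *
          omega
        rw [ih (l + 1) (min (l + 1 + min tl.length sl.length) sl.length) cnt''
          (ans + ((r : Int) - (l : Int))) (by omega) le_rfl hmx' hrep'' hfuel']
        rw [Finset.sum_eq_sum_Ico_succ_bot hlt
          (fun x => (((pvMaxr (sl.map pvBkt) (tl.map pvBkt) x : Nat) : Int) - (x : Int)))]
        rw [← hrmax]
        ring
      · -- invalid window: retreat right by one
        rw [if_pos (by rw [hchk]; simpa using hok)]
        have hmaxlt : pvMaxr (sl.map pvBkt) (tl.map pvBkt) l < r := by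
          rcases Nat.lt_or_ge (pvMaxr (sl.map pvBkt) (tl.map pvBkt) l) r with h | h
          · exact h
          · exact absurd ((pvOk_iff_le_maxr _ _ l r hlr (by rw [hul]; omega)).mpr (by omega)) hok
        have hr1 : 1 ≤ r := by
          have := pvMaxr_ge (sl.map pvBkt) (tl.map pvBkt) l
          omega
        have hcastr : ((r : Int) - 1) = (((r - 1 : Nat)) : Int) := by omega
        rw [hcastr, pvChar_getD sl (r - 1) (by omega)]
        have hbump := pvRep_bumpA _ _ hrep sl[r - 1] (hs _ (List.getElem_mem _)) (-1)
        have hrep' : pvRep (pvBump cnt (pvIdxA sl[r - 1]) (-1))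
            (pvCntF (sl.map pvBkt) l (r - 1)) := by
          refine pvRep_congr _ _ _ hbump ?_
          intro b hb
          have hge := pvMaxr_ge (sl.map pvBkt) (tl.map pvBkt) l
          have ha1 : l ≤ r - 1 := by omega
          have ha2 : r - 1 < (sl.map pvBkt).length := by rw [hul]; omega
          have hsnoc := pvCntF_snoc (sl.map pvBkt) l (r - 1) ha1 ha2 b
          rw [pvBkt_getElem sl (r - 1) (by omega)] at hsnoc
          have hr2 : r - 1 + 1 = r := by omega
          rw [hr2] at hsnoc
          by_cases hbc : b = pvBkt sl[r - 1]
          · rw [← hbc] at hsnoc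
            rw [if_pos rfl] at hsnoc
            rw [← hbc, Function.update_self, hsnoc]
            ring
          · rw [if_neg hbc] at hsnoc
            rw [Function.update_of_ne hbc, hsnoc]
        have hrm2 : r - 1 ≤ min (l + min tl.length sl.length) sl.length := by omega
        have hmx2 : pvMaxr (sl.map pvBkt) (tl.map pvBkt) l ≤ r - 1 := by omega
        have hfl : (sl.length - l) * (sl.length + 2) + (r - 1) + 1 ≤ fuel := by
          generalize hK : (sl.length - l) * (sl.length + 2) = K at hfuel ⊢
          omega
        rw [ih l (r - 1) _ ans hln hrm2 hmx2 hrep' hfl]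
    · have hl : l = sl.length := by omega
      simp only [pvLoopA]
      rw [if_neg (show ¬ ((l : Nat) : Int) < ((sl.length : Nat) : Int) by exact_mod_cast hlt)]
      subst hl
      rw [Finset.Ico_self, Finset.sum_empty, add_zero]


-- ---- B-side loop invariants ----

-- the incremental violation counter: either the window fits (ov = 0) or exactly one bucket
-- exceeds its limit, by exactly one (ov = 1)
def pvOv (u v : List Nat) (l r : Nat) (ov : Int) : Prop :=
  (ov = 0 ∧ pvOk u v l r = true) ∨
  (ov = 1 ∧ ∃ b0, b0 < 26 ∧ (pvSeg u l r).count b0 = v.count b0 + 1 ∧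
    ∀ b, b < 26 → b ≠ b0 → (pvSeg u l r).count b ≤ v.count b)

lemma pvMinl_zero (u v : List Nat) : pvMinl u v 0 = 0 := by
  simp [pvMinl]

lemma pvShrink_spec (sl tl : List Char) (hs : ∀ c ∈ sl, pvInR c)
    (limit : List Int) (hlim : pvRep limit (fun b => (((tl.map pvBkt).count b : Nat) : Int)))
    (r1 : Nat) (hr1 : r1 ≤ sl.length) :
    ∀ (fuel : Nat) (l : Nat) (cnt : List Int) (ov : Int),
      l ≤ pvMinl (sl.map pvBkt) (tl.map pvBkt) r1 →
      pvRep cnt (pvCntF (sl.map pvBkt) l r1) →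
      pvOv (sl.map pvBkt) (tl.map pvBkt) l r1 ov →
      r1 + 1 - l ≤ fuel →
      ∃ cnt', pvShrinkB sl limit fuel ov (l : Int) cnt
          = (0, ((pvMinl (sl.map pvBkt) (tl.map pvBkt) r1 : Nat) : Int), cnt')
        ∧ pvRep cnt' (pvCntF (sl.map pvBkt) (pvMinl (sl.map pvBkt) (tl.map pvBkt) r1) r1) := by
  intro fuel
  induction fuel with
  | zero =>
    intro l cnt ov hl hrep hov hfuel
    have := pvMinl_le (sl.map pvBkt) (tl.map pvBkt) r1
    omega
  | succ fuel ih =>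
    intro l cnt ov hl hrep hov hfuel
    have hml := pvMinl_le (sl.map pvBkt) (tl.map pvBkt) r1
    have hlr1 : l ≤ r1 := by omega
    rcases hov with ⟨hov0, hok⟩ | ⟨hov1, b0, hb0, hviol, hrest⟩
    · -- ov = 0 : the window already fits, so l is exactly minl r1
      have hminl : pvMinl (sl.map pvBkt) (tl.map pvBkt) r1 = l :=
        le_antisymm ((pvOk_iff_minl_le _ _ l r1 hlr1).mp hok) hl
      subst hov0
      simp only [pvShrinkB]
      rw [if_neg (by omega)]
      exact ⟨cnt, by rw [hminl], by rw [hminl]; exact hrep⟩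
    · -- ov = 1 : some bucket b0 exceeds by one; drop s[left] and continue
      have hnok : ¬ pvOk (sl.map pvBkt) (tl.map pvBkt) l r1 = true := by
        rw [pvOk_iff]
        intro h
        have := h b0 hb0
        omega
      have hlminl : l < pvMinl (sl.map pvBkt) (tl.map pvBkt) r1 := by
        rcases Nat.lt_or_ge l (pvMinl (sl.map pvBkt) (tl.map pvBkt) r1) with h | h
        · exact h
        · exact absurd ((pvOk_iff_minl_le _ _ l r1 hlr1).mpr h) hnok
      have hlr : l < r1 := by omega
      have hln : l < sl.length := by omega
      subst hov1
      simp only [pvShrinkB]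
      rw [if_pos (by omega)]
      rw [pvChar_getD sl l hln]
      obtain ⟨h26, hf⟩ := hrep
      have hj := pvBkt_lt sl[l]
      have hcj : PySem.List.pyGetD cnt ((sl[l].toNat : Int) - 97) 0
          = ((List.count (pvBkt sl[l]) (pvSeg (sl.map pvBkt) l r1) : Nat) : Int) := by
        rw [pvGetD_bkt cnt h26 sl[l] (hs _ (List.getElem_mem _)) 0]
        exact hf _ hj
      have hlj : PySem.List.pyGetD limit ((sl[l].toNat : Int) - 97) 0
          = ((List.count (pvBkt sl[l]) (tl.map pvBkt) : Nat) : Int) := by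
        rw [pvGetD_bkt limit hlim.1 sl[l] (hs _ (List.getElem_mem _)) 0]
        exact hlim.2 _ hj
      rw [hcj, hlj]
      -- counts before/after dropping the head s[l]
      have hseg := pvSeg_cons (sl.map pvBkt) l r1 hlr (by simpa using hln)
      rw [pvBkt_getElem sl l hln] at hseg
      have hcount : ∀ b, List.count b (pvSeg (sl.map pvBkt) l r1)
          = List.count b (pvSeg (sl.map pvBkt) (l + 1) r1)
            + if b = pvBkt sl[l] then 1 else 0 := by
        intro b
        rw [hseg, List.count_cons]
        by_cases hbc : b = pvBkt sl[l]
        · have he : (pvBkt sl[l] == b) = true := by simp [hbc]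
          rw [he, if_pos hbc]
          norm_num
        · have he : (pvBkt sl[l] == b) = false := by simp [Ne.symm hbc]
          rw [he, if_neg hbc]
          norm_num
      -- the new count array represents the shrunk window
      have hbump := pvRep_bumpB cnt _ ⟨h26, hf⟩ sl[l] (hs _ (List.getElem_mem _)) (-1)
      have hrep' : pvRep (pvBump cnt ((sl[l].toNat : Int) - 97) (-1))
          (pvCntF (sl.map pvBkt) (l + 1) r1) := by
        refine pvRep_congr _ _ _ hbump ?_
        intro b hb
        unfold pvCntF
        by_cases hbc : b = pvBkt sl[l]
        · rw [← hbc, Function.update_self]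
          have hcb := hcount b
          rw [if_pos hbc] at hcb
          rw [hcb]
          push_cast
          ring
        · rw [Function.update_of_ne hbc]
          have hcb := hcount b
          rw [if_neg hbc] at hcb
          rw [hcb]
          push_cast
          ring
      have hcast : ((l : Int) + 1) = (((l + 1 : Nat)) : Int) := by push_cast; ring
      by_cases hj0 : pvBkt sl[l] = b0
      · -- dropping the violating bucket: counter goes to 0, window fits
        have hbeq : ((((List.count (pvBkt sl[l]) (pvSeg (sl.map pvBkt) l r1) : Nat)) : Int)
            == (((List.count (pvBkt sl[l]) (tl.map pvBkt) : Nat)) : Int) + 1) = true := by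
          rw [beq_iff_eq, hj0]
          exact_mod_cast hviol
        rw [hbeq, if_pos rfl, hcast]
        have hok' : pvOk (sl.map pvBkt) (tl.map pvBkt) (l + 1) r1 = true := by
          rw [pvOk_iff]
          intro b hb
          have hc := hcount b
          by_cases hbc : b = b0
          · rw [hbc] at hc ⊢
            rw [← hj0, if_pos rfl] at hc
            rw [hj0] at hc
            omega
          · have := hrest b hb hbc
            omega
        exact ih (l + 1) _ 0 (by omega) hrep' (Or.inl ⟨rfl, hok'⟩) (by omega)
      · -- dropping a non-violating bucket: still exactly one violation
        have hble : List.count (pvBkt sl[l]) (pvSeg (sl.map pvBkt) l r1)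
            ≤ List.count (pvBkt sl[l]) (tl.map pvBkt) := hrest _ hj hj0
        have hbeq : ((((List.count (pvBkt sl[l]) (pvSeg (sl.map pvBkt) l r1) : Nat)) : Int)
            == (((List.count (pvBkt sl[l]) (tl.map pvBkt) : Nat)) : Int) + 1) = false := by
          rw [beq_eq_false_iff_ne]
          intro hcontr
          have : List.count (pvBkt sl[l]) (pvSeg (sl.map pvBkt) l r1)
              = List.count (pvBkt sl[l]) (tl.map pvBkt) + 1 := by exact_mod_cast hcontr
          omega
        rw [hbeq, if_neg (by simp), hcast]
        have hov' : pvOv (sl.map pvBkt) (tl.map pvBkt) (l + 1) r1 1 := by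
          refine Or.inr ⟨rfl, b0, hb0, ?_, ?_⟩
          · have hc := hcount b0
            rw [if_neg (fun hh => hj0 hh.symm)] at hc
            omega
          · intro b hb hbne
            have hc := hcount b
            have := hrest b hb hbne
            by_cases hbc : b = pvBkt sl[l]
            · rw [if_pos hbc] at hc
              omega
            · rw [if_neg hbc] at hc
              omega
        exact ih (l + 1) _ 1 (by omega) hrep' hov' (by omega)


lemma pvFoldB_spec (sl tl : List Char) (hs : ∀ c ∈ sl, pvInR c)
    (limit : List Int) (hlim : pvRep limit (fun b => (((tl.map pvBkt).count b : Nat) : Int))) :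
    ∀ (m : Nat), m ≤ sl.length →
      ∃ cnt, ((PySem.List.pyRange 0 (m : Int) 1).foldl
          (fun (st : Int × List Int × Int × Int) right =>
            match st with
            | (left, cnt, ov, ans) =>
              let i := ((PySem.List.pyGetD sl right ' ').toNat : Int) - 97
              let cnt' := pvBump cnt i 1
              let ov' :=
                if PySem.List.pyGetD cnt' i 0 == PySem.List.pyGetD limit i 0 + 1 then ov + 1
                else ov
              let olc := pvShrinkB sl limit (sl.length + 1) ov' left cnt'
              (olc.2.1, olc.2.2, olc.1, ans + (right - olc.2.1 + 1)))
          ((0 : Int), List.replicate 26 (0 : Int), (0 : Int), (0 : Int)))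
        = (((pvMinl (sl.map pvBkt) (tl.map pvBkt) m : Nat) : Int), cnt, (0 : Int),
            ∑ x ∈ Finset.range m,
              ((x : Int) - ((pvMinl (sl.map pvBkt) (tl.map pvBkt) (x + 1) : Nat) : Int) + 1))
        ∧ pvRep cnt (pvCntF (sl.map pvBkt) (pvMinl (sl.map pvBkt) (tl.map pvBkt) m) m) := by
  intro m
  induction m with
  | zero =>
    intro _
    refine ⟨List.replicate 26 0, ?_, ?_⟩
    · rw [show ((0 : Nat) : Int) = (0 : Int) from rfl, PySem.List.pyRange_one_eq_nil le_rfl]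
      simp [pvMinl_zero]
    · rw [pvMinl_zero]
      exact pvRep_congr _ _ _ pvRep_zero (fun b hb => by rw [pvCntF_empty])
  | succ m ih =>
    intro hm
    have hmlt : m < sl.length := by omega
    obtain ⟨cnt, heq, hrep⟩ := ih (by omega)
    have hsplit : PySem.List.pyRange 0 ((m + 1 : Nat) : Int) 1
        = PySem.List.pyRange 0 (m : Int) 1 ++ [(m : Int)] := by
      have he : ((m + 1 : Nat) : Int) = ((m : Nat) : Int) + 1 := by push_cast; ring
      rw [he, PySem.List.pyRange_one_succ_right (by positivity)]
    rw [hsplit, List.foldl_append, heq, List.foldl_cons, List.foldl_nil]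
    dsimp only
    rw [pvChar_getD sl m hmlt]
    have hml := pvMinl_le (sl.map pvBkt) (tl.map pvBkt) m
    have hbump := pvRep_bumpB cnt _ hrep sl[m] (hs _ (List.getElem_mem _)) 1
    have hsnoc := pvSeg_snoc (sl.map pvBkt) (pvMinl (sl.map pvBkt) (tl.map pvBkt) m) m hml
      (by simpa using hmlt)
    rw [pvBkt_getElem sl m hmlt] at hsnoc
    have hcnt : ∀ b, List.count b (pvSeg (sl.map pvBkt)
          (pvMinl (sl.map pvBkt) (tl.map pvBkt) m) (m + 1))
        = List.count b (pvSeg (sl.map pvBkt) (pvMinl (sl.map pvBkt) (tl.map pvBkt) m) m)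
          + if b = pvBkt sl[m] then 1 else 0 := by
      intro b
      rw [hsnoc, List.count_append, List.count_singleton]
      by_cases hbc : b = pvBkt sl[m]
      · have he : (pvBkt sl[m] == b) = true := by simp [hbc]
        rw [he, if_pos hbc]
        norm_num
      · have he : (pvBkt sl[m] == b) = false := by simp [Ne.symm hbc]
        rw [he, if_neg hbc]
        norm_num
    have hrep1 : pvRep (pvBump cnt ((sl[m].toNat : Int) - 97) 1)
        (pvCntF (sl.map pvBkt) (pvMinl (sl.map pvBkt) (tl.map pvBkt) m) (m + 1)) := by
      refine pvRep_congr _ _ _ hbump ?_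
      intro b hb
      unfold pvCntF
      by_cases hbc : b = pvBkt sl[m]
      · rw [← hbc, Function.update_self]
        have hcb := hcnt b
        rw [if_pos hbc] at hcb
        rw [hcb]
        push_cast
        ring
      · rw [Function.update_of_ne hbc]
        have hcb := hcnt b
        rw [if_neg hbc] at hcb
        rw [hcb]
        push_cast
        ring
    have hok_m : pvOk (sl.map pvBkt) (tl.map pvBkt) (pvMinl (sl.map pvBkt) (tl.map pvBkt) m) m
        = true := pvOk_minl _ _ m
    rw [pvOk_iff] at hok_m
    have hjlt := pvBkt_lt sl[m]
    -- the freshly read counter values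
    have hcj : PySem.List.pyGetD (pvBump cnt ((sl[m].toNat : Int) - 97) 1)
          ((sl[m].toNat : Int) - 97) 0
        = ((List.count (pvBkt sl[m]) (pvSeg (sl.map pvBkt)
            (pvMinl (sl.map pvBkt) (tl.map pvBkt) m) (m + 1)) : Nat) : Int) := by
      rw [pvGetD_bkt _ hrep1.1 sl[m] (hs _ (List.getElem_mem _)) 0]
      exact hrep1.2 _ hjlt
    have hlj : PySem.List.pyGetD limit ((sl[m].toNat : Int) - 97) 0
        = ((List.count (pvBkt sl[m]) (tl.map pvBkt) : Nat) : Int) := by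
      rw [pvGetD_bkt limit hlim.1 sl[m] (hs _ (List.getElem_mem _)) 0]
      exact hlim.2 _ hjlt
    rw [hcj, hlj]
    have hlmono : pvMinl (sl.map pvBkt) (tl.map pvBkt) m
        ≤ pvMinl (sl.map pvBkt) (tl.map pvBkt) (m + 1) := pvMinl_mono _ _ m (m + 1) (by omega)
    have hml1 := pvMinl_le (sl.map pvBkt) (tl.map pvBkt) (m + 1)
    have hov : ∀ (ovv : Int),
        pvOv (sl.map pvBkt) (tl.map pvBkt) (pvMinl (sl.map pvBkt) (tl.map pvBkt) m) (m + 1) ovv →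
        ∃ cnt'', pvShrinkB sl limit (sl.length + 1) ovv
            ((pvMinl (sl.map pvBkt) (tl.map pvBkt) m : Nat) : Int)
            (pvBump cnt ((sl[m].toNat : Int) - 97) 1)
          = (0, ((pvMinl (sl.map pvBkt) (tl.map pvBkt) (m + 1) : Nat) : Int), cnt'')
          ∧ pvRep cnt'' (pvCntF (sl.map pvBkt)
              (pvMinl (sl.map pvBkt) (tl.map pvBkt) (m + 1)) (m + 1)) := by
      intro ovv hovv
      exact pvShrink_spec sl tl hs limit hlim (m + 1) (by omega) (sl.length + 1)
        (pvMinl (sl.map pvBkt) (tl.map pvBkt) m) _ ovv hlmono hrep1 hovv (by omega)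
    by_cases hj : List.count (pvBkt sl[m]) (pvSeg (sl.map pvBkt)
          (pvMinl (sl.map pvBkt) (tl.map pvBkt) m) (m + 1))
        = List.count (pvBkt sl[m]) (tl.map pvBkt) + 1
    · -- the new character overflows its bucket: ov' = 1
      have hbeq : ((((List.count (pvBkt sl[m]) (pvSeg (sl.map pvBkt)
              (pvMinl (sl.map pvBkt) (tl.map pvBkt) m) (m + 1)) : Nat)) : Int)
          == (((List.count (pvBkt sl[m]) (tl.map pvBkt) : Nat)) : Int) + 1) = true := by
        rw [beq_iff_eq]
        exact_mod_cast hj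
      rw [hbeq, if_pos rfl, zero_add]
      obtain ⟨cnt'', hseq, hrep2⟩ := hov 1 (Or.inr ⟨rfl, pvBkt sl[m], hjlt, hj, by
        intro b hb hbne
        have hcb := hcnt b
        rw [if_neg hbne] at hcb
        rw [hcb]
        exact hok_m b hb⟩)
      rw [hseq]
      refine ⟨cnt'', ?_, hrep2⟩
      rw [Finset.sum_range_succ]
    · -- still fits: ov' = 0
      have hbeq : ((((List.count (pvBkt sl[m]) (pvSeg (sl.map pvBkt)
              (pvMinl (sl.map pvBkt) (tl.map pvBkt) m) (m + 1)) : Nat)) : Int)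
          == (((List.count (pvBkt sl[m]) (tl.map pvBkt) : Nat)) : Int) + 1) = false := by
        rw [beq_eq_false_iff_ne]
        intro hcontr
        exact hj (by exact_mod_cast hcontr)
      rw [hbeq, if_neg (by simp)]
      have hok1 : pvOk (sl.map pvBkt) (tl.map pvBkt)
          (pvMinl (sl.map pvBkt) (tl.map pvBkt) m) (m + 1) = true := by
        rw [pvOk_iff]
        intro b hb
        have hcb := hcnt b
        by_cases hbc : b = pvBkt sl[m]
        · rw [if_pos hbc] at hcb
          have h1 := hok_m b hb
          rw [← hbc] at hj
          omega
        · rw [if_neg hbc] at hcb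
          have h1 := hok_m b hb
          omega
      obtain ⟨cnt'', hseq, hrep2⟩ := hov 0 (Or.inl ⟨rfl, hok1⟩)
      rw [hseq]
      refine ⟨cnt'', ?_, hrep2⟩
      rw [Finset.sum_range_succ]

-- ===== VERDICT (by name: the statement is the Claim_ definition above) =====
lemma pvCntF_zero_take (u : List Nat) (w b : Nat) :
    pvCntF u 0 w b = ((List.count b (u.take w) : Nat) : Int) := by
  unfold pvCntF pvSeg
  rw [List.drop_zero, Nat.sub_zero]

theorem substring_count_spec : Claim_equal_substring_count := by
  intro s t _ hpre
  unfold Pre_substring_count at hpre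
  rw [Bool.and_eq_true] at hpre
  unfold Spec_substring_count substring_count substring_count_alt
  have hs : ∀ c ∈ s.toList, pvInR c := by
    intro c hc
    have h1 := List.all_eq_true.mp hpre.1 c hc
    rw [Bool.and_eq_true] at h1
    exact ⟨by simpa using h1.1, by simpa using h1.2⟩
  have ht : ∀ c ∈ t.toList, pvInR c := by
    intro c hc
    have h1 := List.all_eq_true.mp hpre.2 c hc
    rw [Bool.and_eq_true] at h1
    exact ⟨by simpa using h1.1, by simpa using h1.2⟩
  set sl := s.toList with hslDef
  set tl := t.toList with htlDef
  have hu := pvBktMap_lt sl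
  have hv := pvBktMap_lt tl
  have hul : (sl.map pvBkt).length = sl.length := by simp
  have hvl : (tl.map pvBkt).length = tl.length := by simp
  have hlen : PySem.List.len sl = ((sl.length : Nat) : Int) := by simp [PySem.List.len_eq]
  have hlent : PySem.List.len tl = ((tl.length : Nat) : Int) := by simp [PySem.List.len_eq]
  have hwin : min (PySem.List.len tl) (PySem.List.len sl)
      = ((min tl.length sl.length : Nat) : Int) := by
    rw [hlen, hlent]
    simp [Nat.cast_min]
  have hwle : min tl.length sl.length ≤ sl.length := min_le_right _ _
  dsimp only
  rw [hwin, hlen, hlent]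
  -- A side: the sliding-window loop sums maxr x - x
  have htc : pvRep (pvCountA tl 0 ((tl.length : Nat) : Int))
      (fun b => (((tl.map pvBkt).count b : Nat) : Int)) := by
    refine pvRep_congr _ _ _ (pvCount_rep tl ht tl.length le_rfl) ?_
    intro b hb
    rw [List.take_length]
  have hrep0 : pvRep (pvCountA sl 0 ((min tl.length sl.length : Nat) : Int))
      (pvCntF (sl.map pvBkt) 0 (min tl.length sl.length)) := by
    refine pvRep_congr _ _ _ (pvCount_rep sl hs (min tl.length sl.length) hwle) ?_
    intro b hb
    rw [pvCntF_zero_take, List.map_take]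
  have hmx0 : pvMaxr (sl.map pvBkt) (tl.map pvBkt) 0 ≤ min tl.length sl.length := by
    have := pvMaxr_le_min (sl.map pvBkt) (tl.map pvBkt) 0 (min tl.length sl.length)
      (by omega) (by rw [hul, hvl]) hu hv
    rw [hul] at this
    omega
  have hfuel0 : (sl.length - 0) * (sl.length + 2) + min tl.length sl.length + 1
      ≤ (sl.length + 1) * (sl.length + 3) := by
    have hx : (sl.length + 1) * (sl.length + 3)
        = sl.length * (sl.length + 2) + (2 * sl.length + 3) := by ring
    rw [Nat.sub_zero]
    omega
  have key := pvLoopA_spec sl tl hs (pvCountA tl 0 ((tl.length : Nat) : Int)) htc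
    ((sl.length + 1) * (sl.length + 3)) 0 (min tl.length sl.length)
    (pvCountA sl 0 ((min tl.length sl.length : Nat) : Int)) 0
    (by omega) (by omega) hmx0 hrep0 hfuel0
  rw [Nat.cast_zero] at key
  rw [key, zero_add]
  -- B side: the two-pointer fold sums r - minl (r+1) + 1
  have hlimrep : pvRep (tl.foldl (fun lim c => pvBump lim ((c.toNat : Int) - 97) 1)
        (List.replicate 26 0))
      (fun b => (((tl.map pvBkt).count b : Nat) : Int)) := by
    refine pvRep_congr _ _ _ (pvLimit_fold tl (List.replicate 26 0) _ pvRep_zero ht) ?_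
    intro b hb
    simp
  obtain ⟨cntB, heqB, _⟩ := pvFoldB_spec sl tl hs _ hlimrep sl.length le_rfl
  rw [heqB]
  -- both sums count the fitting windows
  have hfub := pvFubini (sl.map pvBkt) (tl.map pvBkt)
  rw [hul] at hfub
  rw [← Finset.range_eq_Ico]
  rw [Finset.sum_congr rfl (fun x hx =>
    (Nat.cast_sub (pvMaxr_ge (sl.map pvBkt) (tl.map pvBkt) x)).symm
      : ∀ x ∈ Finset.range sl.length,
        (((pvMaxr (sl.map pvBkt) (tl.map pvBkt) x : Nat) : Int) - (x : Int))
          = (((pvMaxr (sl.map pvBkt) (tl.map pvBkt) x - x : Nat)) : Int))]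
  have hB : ∀ x ∈ Finset.range sl.length,
      ((x : Int) - ((pvMinl (sl.map pvBkt) (tl.map pvBkt) (x + 1) : Nat) : Int) + 1)
        = (((x + 1 - pvMinl (sl.map pvBkt) (tl.map pvBkt) (x + 1) : Nat)) : Int) := by
    intro x hx
    have hle := pvMinl_le (sl.map pvBkt) (tl.map pvBkt) (x + 1)
    rw [Nat.cast_sub hle]
    push_cast
    ring
  rw [Finset.sum_congr rfl hB]
  rw [← Nat.cast_sum, ← Nat.cast_sum]
  congr 1
  rw [hfub, Finset.sum_range_succ' (fun x => x - pvMinl (sl.map pvBkt) (tl.map pvBkt) x)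
    sl.length]
  simp [pvMinl_zero]
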